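-- pv_equiv track=rewrite | github.com/shaoyu12138/CodeOracle | CodeOracle.py | _determine_shiyao
-- ===== SOURCE A (Python) =====
-- def _determine_shiyao(orig_bits: int) -> int:
--     """计算世爻(1‑6)：在六爻皆动且非纯乾/坤时使用"""
--     lower = lambda b: b & 0b000111
--     upper = lambda b: (b >> 3) & 0b000111
--     is_pure = lambda b: lower(b) == upper(b)
--     if is_pure(orig_bits):
--         return 6
--     working = orig_bits
--     steps = [[1], [2], [3], [4], [5], [4], [1, 2, 3]]
--     for group in steps:
--         for pos in group:
--             working ^= 1 << (pos - 1)
--         if is_pure(working):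
--             return max(group)
--     raise RuntimeError("世爻计算失败：七步内未得纯卦")
-- ===== SOURCE B (Python) =====
-- def _determine_shiyao(orig_bits: int) -> int:
--     """计算世爻(1‑6)：closed-form lookup — the whole step simulation depends only on
--     diff = lower ^ upper, so index a precomputed table with it."""
--     diff = (orig_bits ^ (orig_bits >> 3)) & 0b111
--     return [6, 1, 3, 2, 5, 4, 4, 3][diff]
-- ===== Notes on version B (the rewrite author's own statement) =====
-- stated objective: simpler
-- what changed: Replaces the 7-step XOR flip simulation with a single closed-form table lookup indexed by diff = (orig_bits ^ (orig_bits >> 3)) & 7, since the loop's outcome depends only on that 3-bit difference.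
import Mathlib
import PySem

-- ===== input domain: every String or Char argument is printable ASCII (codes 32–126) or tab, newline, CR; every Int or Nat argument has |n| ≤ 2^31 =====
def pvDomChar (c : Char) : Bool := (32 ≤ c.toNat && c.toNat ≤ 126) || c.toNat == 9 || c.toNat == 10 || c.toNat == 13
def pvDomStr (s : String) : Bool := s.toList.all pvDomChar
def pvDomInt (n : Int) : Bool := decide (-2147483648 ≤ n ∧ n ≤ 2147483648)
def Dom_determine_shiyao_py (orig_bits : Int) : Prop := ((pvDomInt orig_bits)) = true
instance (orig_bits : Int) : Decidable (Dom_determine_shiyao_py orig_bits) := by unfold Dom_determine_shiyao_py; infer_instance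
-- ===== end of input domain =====

-- B replaces A's 7-step XOR flip simulation by one closed-form table lookup on diff = (b ^ (b >> 3)) & 7 (objective: simpler).

-- ===== PORT A =====
-- lower = lambda b: b & 0b000111
def pvLower (b : Int) : Int := PySem.Int.band b 7
-- upper = lambda b: (b >> 3) & 0b000111
def pvUpper (b : Int) : Int := PySem.Int.band (b >>> (3 : Nat)) 7
-- is_pure = lambda b: lower(b) == upper(b)
def pvIsPure (b : Int) : Bool := pvLower b == pvUpper b
-- steps = [[1], [2], [3], [4], [5], [4], [1, 2, 3]]
def pvSteps : List (List Int) := [[1], [2], [3], [4], [5], [4], [1, 2, 3]]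
-- the for-loop over steps, with early return; 'working ^= 1 << (pos - 1)' is the inner foldl.
-- '(pos - 1).toNat' is exact here: every pos in pvSteps is ≥ 1 (Python would raise on a negative shift).
-- 'max(group)' is (PySem.List.max? group).getD 0: every group in pvSteps is nonempty, so getD never uses the default.
-- the final 'raise RuntimeError' corresponds to the [] case; it is unreachable for every input (the proof below
-- shows the loop always returns), the 0 there is never produced.
def pvLoop : Int → List (List Int) → Int
  | _, [] => 0
  | w, g :: rest =>
      let w' := g.foldl (fun acc pos => PySem.Int.bxor acc ((1 : Int) <<< (pos - 1).toNat)) w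
      if pvIsPure w' then (PySem.List.max? g (fun y => y)).getD 0 else pvLoop w' rest

def determine_shiyao_py (orig_bits : Int) : Int :=
  if pvIsPure orig_bits then 6 else pvLoop orig_bits pvSteps

-- ===== PORT B =====
-- diff = (orig_bits ^ (orig_bits >> 3)) & 0b111; return [6, 1, 3, 2, 5, 4, 4, 3][diff]
-- (0 ≤ diff < 8 always, so the index is in range and pyGetD's default is never used)
def determine_shiyao_py_alt (orig_bits : Int) : Int :=
  let diff := PySem.Int.band (PySem.Int.bxor orig_bits (orig_bits >>> (3 : Nat))) 7
  PySem.List.pyGetD [6, 1, 3, 2, 5, 4, 4, 3] diff 0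

-- ===== PRECONDITION & SPEC =====
def Spec_determine_shiyao_py (orig_bits : Int) (out : Int) : Prop := out = determine_shiyao_py_alt orig_bits
instance (orig_bits : Int) (out : Int) : Decidable (Spec_determine_shiyao_py orig_bits out) := by unfold Spec_determine_shiyao_py; infer_instance

-- ===== CLAIM (what is proved, stated in full; the proofs are below) =====
def Claim_equal_determine_shiyao_py : Prop := ∀ (orig_bits : Int), Dom_determine_shiyao_py orig_bits → Spec_determine_shiyao_py orig_bits (determine_shiyao_py orig_bits)

-- ===== LEMMAS AND PROOFS =====

theorem pvNatSplit (m n : Nat) : m ^^^ n = 8 * ((m / 8) ^^^ (n / 8)) + (m % 8 ^^^ n % 8) := by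
  have hY : m % 8 ^^^ n % 8 < 8 :=
    Nat.xor_lt_two_pow (n := 3) (Nat.mod_lt _ (by norm_num)) (Nat.mod_lt _ (by norm_num))
  apply Nat.eq_of_testBit_eq
  intro i
  have e : 8 * ((m / 8) ^^^ (n / 8)) + (m % 8 ^^^ n % 8)
      = 2 ^ 3 * ((m / 8) ^^^ (n / 8)) + (m % 8 ^^^ n % 8) := by ring_nf
  rw [e, Nat.testBit_two_pow_mul_add _ hY i]
  rcases Nat.lt_or_ge i 3 with hi | hi
  · have hm : m % 8 = m % 2 ^ 3 := by norm_num
    have hn : n % 8 = n % 2 ^ 3 := by norm_num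
    simp [hi, Nat.testBit_xor, hm, hn, Nat.testBit_mod_two_pow]
  · have hm : m / 8 = m >>> 3 := by simp [Nat.shiftRight_eq_div_pow]
    have hn : n / 8 = n >>> 3 := by simp [Nat.shiftRight_eq_div_pow]
    have hii : 3 + (i - 3) = i := by omega
    simp [Nat.not_lt.2 hi, Nat.testBit_xor, hm, hn, Nat.testBit_shiftRight, hii]

theorem pvComplXorL : ∀ x < 8, ∀ y < 8, ((7 - x) ^^^ y) = 7 - (x ^^^ (y : Nat)) := by decide
theorem pvComplXorR : ∀ x < 8, ∀ y < 8, (x ^^^ (7 - y)) = 7 - (x ^^^ (y : Nat)) := by decide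
theorem pvComplXor2 : ∀ x < 8, ∀ y < 8, ((7 - x) ^^^ (7 - y)) = (x ^^^ (y : Nat)) := by decide

theorem pvSplit (a b : Int) :
    PySem.Int.bxor a b = 8 * PySem.Int.bxor (a / 8) (b / 8) + ((a % 8).toNat ^^^ (b % 8).toNat : Nat) := by
  by_cases h1 : 0 ≤ a <;> by_cases h2 : 0 ≤ b
  · have h1' : 0 ≤ a / 8 := by omega
    have h2' : 0 ≤ b / 8 := by omega
    simp only [PySem.Int.bxor, h1, h2, h1', h2', if_pos]
    have e1 : (a / 8).toNat = a.toNat / 8 := by omega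
    have e2 : (b / 8).toNat = b.toNat / 8 := by omega
    have e3 : (a % 8).toNat = a.toNat % 8 := by omega
    have e4 : (b % 8).toNat = b.toNat % 8 := by omega
    rw [e1, e2, e3, e4]
    have := pvNatSplit a.toNat b.toNat
    omega
  · have h1' : 0 ≤ a / 8 := by omega
    have h2' : ¬ 0 ≤ b / 8 := by omega
    simp only [PySem.Int.bxor, h1, h2, h1', h2', if_pos, if_false]
    have e1 : (a / 8).toNat = a.toNat / 8 := by omega
    have e2 : (-(b / 8) - 1).toNat = (-b - 1).toNat / 8 := by omega
    have e3 : (a % 8).toNat = a.toNat % 8 := by omega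
    have e4 : (b % 8).toNat = 7 - (-b - 1).toNat % 8 := by omega
    rw [e1, e2, e3, e4]
    have hs := pvNatSplit a.toNat (-b - 1).toNat
    have hc := pvComplXorR (a.toNat % 8) (Nat.mod_lt _ (by norm_num)) ((-b - 1).toNat % 8) (Nat.mod_lt _ (by norm_num))
    have hb : a.toNat % 8 ^^^ (-b - 1).toNat % 8 < 8 :=
      Nat.xor_lt_two_pow (n := 3) (Nat.mod_lt _ (by norm_num)) (Nat.mod_lt _ (by norm_num))
    omega
  · have h1' : ¬ 0 ≤ a / 8 := by omega
    have h2' : 0 ≤ b / 8 := by omega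
    simp only [PySem.Int.bxor, h1, h2, h1', h2', if_pos, if_false]
    have e1 : (-(a / 8) - 1).toNat = (-a - 1).toNat / 8 := by omega
    have e2 : (b / 8).toNat = b.toNat / 8 := by omega
    have e3 : (a % 8).toNat = 7 - (-a - 1).toNat % 8 := by omega
    have e4 : (b % 8).toNat = b.toNat % 8 := by omega
    rw [e1, e2, e3, e4]
    have hs := pvNatSplit (-a - 1).toNat b.toNat
    have hc := pvComplXorL ((-a - 1).toNat % 8) (Nat.mod_lt _ (by norm_num)) (b.toNat % 8) (Nat.mod_lt _ (by norm_num))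
    have hb : (-a - 1).toNat % 8 ^^^ b.toNat % 8 < 8 :=
      Nat.xor_lt_two_pow (n := 3) (Nat.mod_lt _ (by norm_num)) (Nat.mod_lt _ (by norm_num))
    omega
  · have h1' : ¬ 0 ≤ a / 8 := by omega
    have h2' : ¬ 0 ≤ b / 8 := by omega
    simp only [PySem.Int.bxor, h1, h2, h1', h2', if_false]
    have e1 : (-(a / 8) - 1).toNat = (-a - 1).toNat / 8 := by omega
    have e2 : (-(b / 8) - 1).toNat = (-b - 1).toNat / 8 := by omega
    have e3 : (a % 8).toNat = 7 - (-a - 1).toNat % 8 := by omega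
    have e4 : (b % 8).toNat = 7 - (-b - 1).toNat % 8 := by omega
    rw [e1, e2, e3, e4]
    have hs := pvNatSplit (-a - 1).toNat (-b - 1).toNat
    have hc := pvComplXor2 ((-a - 1).toNat % 8) (Nat.mod_lt _ (by norm_num)) ((-b - 1).toNat % 8) (Nat.mod_lt _ (by norm_num))
    omega

-- b & 7 = b % 8 (Python &, Python-exact also on negatives)
theorem pvBand7 (a : Int) : PySem.Int.band a 7 = a % 8 := by
  have hm : ∀ m : Nat, m &&& 7 = m % 8 := by
    intro m
    have := Nat.and_two_pow_sub_one_eq_mod m 3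
    norm_num at this
    exact this
  have h7n : (7 : Int).toNat = 7 := rfl
  by_cases h1 : 0 ≤ a
  · simp only [PySem.Int.band, h1, if_pos, (by norm_num : (0:Int) ≤ 7), h7n]
    have := hm a.toNat
    omega
  · simp only [PySem.Int.band, h1, if_false, if_pos, (by norm_num : (0:Int) ≤ 7), h7n]
    have := hm (-a - 1).toNat
    rw [Nat.and_comm] at this
    omega

theorem pvShift3 (a : Int) : a >>> (3 : Nat) = a / 8 := by
  simp [Int.shiftRight_eq_div_pow]

theorem pvMod8_bxor (a b : Int) :
    PySem.Int.bxor a b % 8 = ((a % 8).toNat ^^^ (b % 8).toNat : Nat) := by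
  have h := pvSplit a b
  have hY : ((a % 8).toNat ^^^ (b % 8).toNat : Nat) < 8 :=
    Nat.xor_lt_two_pow (n := 3) (by omega) (by omega)
  omega

theorem pvDiv8_bxor (a b : Int) :
    PySem.Int.bxor a b / 8 = PySem.Int.bxor (a / 8) (b / 8) := by
  have h := pvSplit a b
  have hY : ((a % 8).toNat ^^^ (b % 8).toNat : Nat) < 8 :=
    Nat.xor_lt_two_pow (n := 3) (by omega) (by omega)
  omega

-- the purity test in terms of the two 3-bit fields
theorem pvPureEval (w : Int) (u v : Nat) (hm : w % 8 = (u : Int)) (hd : w / 8 % 8 = (v : Int)) :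
    pvIsPure w = (u == v) := by
  simp only [pvIsPure, pvLower, pvUpper, pvBand7, pvShift3, hm, hd]
  rw [Bool.eq_iff_iff]
  simp

-- the table forms both programs reduce to
def pvNatA (x y : Nat) : Int :=
  if x == y then 6
  else if x ^^^ 1 == y then 1
  else if (x ^^^ 1) ^^^ 2 == y then 2
  else if ((x ^^^ 1) ^^^ 2) ^^^ 4 == y then 3
  else if ((x ^^^ 1) ^^^ 2) ^^^ 4 == y ^^^ 1 then 4
  else if ((x ^^^ 1) ^^^ 2) ^^^ 4 == (y ^^^ 1) ^^^ 2 then 5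
  else if ((x ^^^ 1) ^^^ 2) ^^^ 4 == ((y ^^^ 1) ^^^ 2) ^^^ 1 then 4
  else if (((((x ^^^ 1) ^^^ 2) ^^^ 4) ^^^ 1) ^^^ 2) ^^^ 4 == ((y ^^^ 1) ^^^ 2) ^^^ 1 then 3
  else 0

def pvNatB (x y : Nat) : Int := List.getD [6, 1, 3, 2, 5, 4, 4, 3] (x ^^^ y) 0

theorem pvTables : ∀ x < 8, ∀ y < 8, pvNatA x y = pvNatB x y := by decide

theorem pvB_eval (a : Int) : determine_shiyao_py_alt a = pvNatB (a % 8).toNat ((a / 8) % 8).toNat := by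
  simp only [determine_shiyao_py_alt, pvShift3, pvBand7, pvMod8_bxor, pvNatB]
  simp

theorem pvA_eval (a : Int) : determine_shiyao_py a = pvNatA (a % 8).toNat ((a / 8) % 8).toNat := by
  have hm0 : a % 8 = (((a % 8).toNat : Nat) : Int) := by omega
  have hd0 : a / 8 % 8 = ((((a / 8) % 8).toNat : Nat) : Int) := by omega
  have p0 := pvPureEval a _ _ hm0 hd0
  -- the successive lower 3-bit fields of `working`
  have hm1 : PySem.Int.bxor a 1 % 8 = (((a % 8).toNat ^^^ 1 : Nat) : Int) := by
    rw [pvMod8_bxor]; norm_num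
  have hm2 : PySem.Int.bxor (PySem.Int.bxor a 1) 2 % 8
      = ((((a % 8).toNat ^^^ 1) ^^^ 2 : Nat) : Int) := by
    rw [pvMod8_bxor, hm1]; norm_num; decide
  have hm3 : PySem.Int.bxor (PySem.Int.bxor (PySem.Int.bxor a 1) 2) 4 % 8
      = (((((a % 8).toNat ^^^ 1) ^^^ 2) ^^^ 4 : Nat) : Int) := by
    rw [pvMod8_bxor, hm2]; norm_num; decide
  have hm4 : PySem.Int.bxor (PySem.Int.bxor (PySem.Int.bxor (PySem.Int.bxor a 1) 2) 4) 8 % 8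
      = (((((a % 8).toNat ^^^ 1) ^^^ 2) ^^^ 4 : Nat) : Int) := by
    rw [pvMod8_bxor, hm3]; norm_num
  have hm5 : PySem.Int.bxor (PySem.Int.bxor (PySem.Int.bxor (PySem.Int.bxor (PySem.Int.bxor a 1) 2) 4) 8) 16 % 8
      = (((((a % 8).toNat ^^^ 1) ^^^ 2) ^^^ 4 : Nat) : Int) := by
    rw [pvMod8_bxor, hm4]; norm_num
  have hm6 : PySem.Int.bxor (PySem.Int.bxor (PySem.Int.bxor (PySem.Int.bxor (PySem.Int.bxor (PySem.Int.bxor a 1) 2) 4) 8) 16) 8 % 8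
      = (((((a % 8).toNat ^^^ 1) ^^^ 2) ^^^ 4 : Nat) : Int) := by
    rw [pvMod8_bxor, hm5]; norm_num
  have hm7a : PySem.Int.bxor (PySem.Int.bxor (PySem.Int.bxor (PySem.Int.bxor (PySem.Int.bxor (PySem.Int.bxor (PySem.Int.bxor a 1) 2) 4) 8) 16) 8) 1 % 8
      = ((((((a % 8).toNat ^^^ 1) ^^^ 2) ^^^ 4) ^^^ 1 : Nat) : Int) := by
    rw [pvMod8_bxor, hm6]; norm_num
  have hm7b : PySem.Int.bxor (PySem.Int.bxor (PySem.Int.bxor (PySem.Int.bxor (PySem.Int.bxor (PySem.Int.bxor (PySem.Int.bxor (PySem.Int.bxor a 1) 2) 4) 8) 16) 8) 1) 2 % 8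
      = (((((((a % 8).toNat ^^^ 1) ^^^ 2) ^^^ 4) ^^^ 1) ^^^ 2 : Nat) : Int) := by
    rw [pvMod8_bxor, hm7a]; norm_num; decide
  have hm7 : PySem.Int.bxor (PySem.Int.bxor (PySem.Int.bxor (PySem.Int.bxor (PySem.Int.bxor (PySem.Int.bxor (PySem.Int.bxor (PySem.Int.bxor (PySem.Int.bxor a 1) 2) 4) 8) 16) 8) 1) 2) 4 % 8
      = ((((((((a % 8).toNat ^^^ 1) ^^^ 2) ^^^ 4) ^^^ 1) ^^^ 2) ^^^ 4 : Nat) : Int) := by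
    rw [pvMod8_bxor, hm7b]; norm_num; decide
  -- the successive upper 3-bit fields of `working`
  have hd1 : PySem.Int.bxor a 1 / 8 = a / 8 := by rw [pvDiv8_bxor]; norm_num
  have hd2 : PySem.Int.bxor (PySem.Int.bxor a 1) 2 / 8 = a / 8 := by
    rw [pvDiv8_bxor, hd1]; norm_num
  have hd3 : PySem.Int.bxor (PySem.Int.bxor (PySem.Int.bxor a 1) 2) 4 / 8 = a / 8 := by
    rw [pvDiv8_bxor, hd2]; norm_num
  have hd4 : PySem.Int.bxor (PySem.Int.bxor (PySem.Int.bxor (PySem.Int.bxor a 1) 2) 4) 8 / 8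
      = PySem.Int.bxor (a / 8) 1 := by
    rw [pvDiv8_bxor, hd3]; norm_num
  have hd4m : PySem.Int.bxor (PySem.Int.bxor (PySem.Int.bxor (PySem.Int.bxor a 1) 2) 4) 8 / 8 % 8
      = ((((a / 8) % 8).toNat ^^^ 1 : Nat) : Int) := by
    rw [hd4, pvMod8_bxor]; norm_num
  have hd5 : PySem.Int.bxor (PySem.Int.bxor (PySem.Int.bxor (PySem.Int.bxor (PySem.Int.bxor a 1) 2) 4) 8) 16 / 8
      = PySem.Int.bxor (PySem.Int.bxor (PySem.Int.bxor (PySem.Int.bxor (PySem.Int.bxor a 1) 2) 4) 8 / 8) 2 := by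
    rw [pvDiv8_bxor]; norm_num
  have hd5m : PySem.Int.bxor (PySem.Int.bxor (PySem.Int.bxor (PySem.Int.bxor (PySem.Int.bxor a 1) 2) 4) 8) 16 / 8 % 8
      = (((((a / 8) % 8).toNat ^^^ 1) ^^^ 2 : Nat) : Int) := by
    rw [hd5, pvMod8_bxor, hd4m]; norm_num; decide
  have hd6m : PySem.Int.bxor (PySem.Int.bxor (PySem.Int.bxor (PySem.Int.bxor (PySem.Int.bxor (PySem.Int.bxor a 1) 2) 4) 8) 16) 8 / 8 % 8
      = ((((((a / 8) % 8).toNat ^^^ 1) ^^^ 2) ^^^ 1 : Nat) : Int) := by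
    rw [pvDiv8_bxor, pvMod8_bxor, hd5m]
    norm_num
  have hd7m : PySem.Int.bxor (PySem.Int.bxor (PySem.Int.bxor (PySem.Int.bxor (PySem.Int.bxor (PySem.Int.bxor (PySem.Int.bxor (PySem.Int.bxor (PySem.Int.bxor a 1) 2) 4) 8) 16) 8) 1) 2) 4 / 8 % 8
      = ((((((a / 8) % 8).toNat ^^^ 1) ^^^ 2) ^^^ 1 : Nat) : Int) := by
    rw [pvDiv8_bxor, pvDiv8_bxor, pvDiv8_bxor]
    norm_num
    exact hd6m
  -- the purity test at each step
  have p1 := pvPureEval _ _ _ hm1 (by rw [hd1]; exact hd0)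
  have p2 := pvPureEval _ _ _ hm2 (by rw [hd2]; exact hd0)
  have p3 := pvPureEval _ _ _ hm3 (by rw [hd3]; exact hd0)
  have p4 := pvPureEval _ _ _ hm4 hd4m
  have p5 := pvPureEval _ _ _ hm5 hd5m
  have p6 := pvPureEval _ _ _ hm6 hd6m
  have p7 := pvPureEval _ _ _ hm7 hd7m
  -- literal shift amounts and group maxima
  have c1 : (1 : Int) <<< ((((1 : Int) - 1).toNat : Nat) : Int) = 1 := by decide
  have c2 : (1 : Int) <<< ((((2 : Int) - 1).toNat : Nat) : Int) = 2 := by decide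
  have c3 : (1 : Int) <<< ((((3 : Int) - 1).toNat : Nat) : Int) = 4 := by decide
  have c4 : (1 : Int) <<< ((((4 : Int) - 1).toNat : Nat) : Int) = 8 := by decide
  have c5 : (1 : Int) <<< ((((5 : Int) - 1).toNat : Nat) : Int) = 16 := by decide
  have g1 : (PySem.List.max? ([1] : List Int) (fun y => y)).getD 0 = 1 := by decide
  have g2 : (PySem.List.max? ([2] : List Int) (fun y => y)).getD 0 = 2 := by decide
  have g3 : (PySem.List.max? ([3] : List Int) (fun y => y)).getD 0 = 3 := by decide
  have g4 : (PySem.List.max? ([4] : List Int) (fun y => y)).getD 0 = 4 := by decide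
  have g5 : (PySem.List.max? ([5] : List Int) (fun y => y)).getD 0 = 5 := by decide
  have g123 : (PySem.List.max? ([1, 2, 3] : List Int) (fun y => y)).getD 0 = 3 := by decide
  simp only [determine_shiyao_py, pvLoop, pvSteps, List.foldl, c1, c2, c3, c4, c5,
    g1, g2, g3, g4, g5, g123, p0, p1, p2, p3, p4, p5, p6, p7, pvNatA]

-- ===== VERDICT (by name: the statement is the Claim_ definition above) =====
theorem determine_shiyao_py_spec : Claim_equal_determine_shiyao_py := by
  intro a _
  unfold Spec_determine_shiyao_py
  rw [pvA_eval, pvB_eval]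
  exact pvTables _ (by omega) _ (by omega)
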